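-- pv_equiv track=rewrite | github.com/huihui520leilei/RL_bomberman | agent_code/my_agent2/callbacks.py | get_relative_position_to_nearest
-- ===== SOURCE A (Python) =====
-- import math
--
-- def get_relative_positions(position, targets):
--     """Returns the relative coin positions."""
--     position_x = position[0]
--     position_y = position[1]
--     relative_positions = []
--     if not targets:
--         return relative_positions
--     for target in targets:
--         target_x = target[0]
--         target_y = target[1]
--         relative_position = (target_x - position_x, target_y - position_y)
--         relative_positions.append(relative_position)
--     return relative_positions
--
-- def get_relative_position_to_nearest(position, targets, max_distance=100):
--     relative_positions = get_relative_positions(position, targets)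
--     relative_position_to_nearest = (0, 0)
--     if not relative_positions:
--         return relative_position_to_nearest
--     min_distance = 100
--     for relative_position in relative_positions:
--         distance = math.sqrt(relative_position[0] ** 2 + relative_position[1] ** 2)
--         if distance < min_distance:
--             relative_position_to_nearest = relative_position
--             min_distance = distance
--     # add offset for positive values only
--     delta_x = relative_position_to_nearest[0]
--     delta_y = relative_position_to_nearest[1]
--     return (delta_x, delta_y)
-- ===== SOURCE B (Python) =====
-- def get_relative_position_to_nearest(position, targets, max_distance=100):
--     px, py = position
--     deltas = [(tx - px, ty - py) for (tx, ty) in targets]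
--     ordered = sorted(deltas, key=lambda d: d[0] * d[0] + d[1] * d[1])
--     if not ordered:
--         return (0, 0)
--     best = ordered[0]
--     if best[0] * best[0] + best[1] * best[1] < 10000:
--         return best
--     return (0, 0)
-- ===== Notes on version B (the rewrite author's own statement) =====
-- stated objective: alternative
-- what changed: Replaces A's running-minimum scan over float sqrt distances with a stable sort of the deltas by squared integer distance, taking the head and applying the strict squared threshold (<10000), which preserves A's ordering, first-among-ties winner and strict <100 cutoff exactly.
import Mathlib
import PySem

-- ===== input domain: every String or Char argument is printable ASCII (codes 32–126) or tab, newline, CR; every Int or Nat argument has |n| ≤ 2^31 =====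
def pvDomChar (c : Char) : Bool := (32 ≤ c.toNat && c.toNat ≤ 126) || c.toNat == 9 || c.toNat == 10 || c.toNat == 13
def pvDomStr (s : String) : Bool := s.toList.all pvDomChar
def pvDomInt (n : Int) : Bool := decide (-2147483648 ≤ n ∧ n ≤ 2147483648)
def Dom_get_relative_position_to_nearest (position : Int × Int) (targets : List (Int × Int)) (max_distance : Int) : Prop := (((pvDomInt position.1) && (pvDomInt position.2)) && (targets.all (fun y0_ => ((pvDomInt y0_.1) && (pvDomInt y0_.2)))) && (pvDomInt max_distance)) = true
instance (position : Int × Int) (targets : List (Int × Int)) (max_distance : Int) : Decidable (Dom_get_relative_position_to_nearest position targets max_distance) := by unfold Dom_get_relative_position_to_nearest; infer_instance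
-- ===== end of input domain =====

-- B replaces A's running-minimum scan over sqrt distances by a stable sort of the deltas
-- by squared distance, taking the head under the strict squared threshold (alternative
-- decomposition, same return value; A's float sqrt comparisons are modelled exactly by
-- integer squared-distance comparisons on this domain — see the comment at PORT A).

-- ===== PORT A =====
-- A's get_relative_positions helper: loop appending (tx-px, ty-py).
def get_relative_positions (position : Int × Int) (targets : List (Int × Int)) : List (Int × Int) :=
  if targets = [] then []
  else targets.foldl (fun acc t => acc ++ [(t.1 - position.1, t.2 - position.2)]) []

-- A's loop keeps (best, min_distance) and updates on 'math.sqrt(dx**2+dy**2) < min_distance'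
-- (min_distance starts at 100.0). Floats are not portable; the comparison is ported as the
-- squared-integer comparison 'd2 < minSq' with minSq starting at 10000. This is EXACT on Dom:
-- an update requires sqrt(d2) < 100, i.e. d2 < 10000 (IEEE sqrt is correctly rounded and
-- sqrt(10000) = 100 exactly), and for integers d2, d2' < 10000 the doubles sqrt(d2), sqrt(d2')
-- are distinct whenever d2 ≠ d2', so 'sqrt d2 < sqrt d2'' ↔ 'd2 < d2'' throughout the loop.
def get_relative_position_to_nearest (position : Int × Int) (targets : List (Int × Int)) (max_distance : Int) : Int × Int :=
  let relative_positions := get_relative_positions position targets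
  if relative_positions = [] then (0, 0)
  else
    let st := relative_positions.foldl
      (fun (st : (Int × Int) × Int) rp =>
        let d2 := rp.1 ^ 2 + rp.2 ^ 2
        if d2 < st.2 then (rp, d2) else st)
      ((0, 0), 10000)
    (st.1.1, st.1.2)

-- ===== PORT B =====
def get_relative_position_to_nearest_alt (position : Int × Int) (targets : List (Int × Int)) (max_distance : Int) : Int × Int :=
  let deltas := targets.map (fun t => (t.1 - position.1, t.2 - position.2))
  let ordered := PySem.List.sorted deltas (fun d => d.1 * d.1 + d.2 * d.2) false
  match ordered with
  | [] => (0, 0)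
  | best :: _ => if best.1 * best.1 + best.2 * best.2 < 10000 then best else (0, 0)

-- ===== PRECONDITION & SPEC =====
def Spec_get_relative_position_to_nearest (position : Int × Int) (targets : List (Int × Int)) (max_distance : Int) (out : Int × Int) : Prop := out = get_relative_position_to_nearest_alt position targets max_distance
instance (position : Int × Int) (targets : List (Int × Int)) (max_distance : Int) (out : Int × Int) : Decidable (Spec_get_relative_position_to_nearest position targets max_distance out) := by unfold Spec_get_relative_position_to_nearest; infer_instance

-- ===== CLAIM (what is proved, stated in full; the proofs are below) =====
def Claim_equal_get_relative_position_to_nearest : Prop := ∀ (position : Int × Int) (targets : List (Int × Int)) (max_distance : Int), Dom_get_relative_position_to_nearest position targets max_distance → Spec_get_relative_position_to_nearest position targets max_distance (get_relative_position_to_nearest position targets max_distance)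

-- ===== LEMMAS AND PROOFS =====

-- the squared-distance key
def pvKey (d : Int × Int) : Int := d.1 * d.1 + d.2 * d.2

-- A's loop step on the (best, minSq) state
def pvStep (st : (Int × Int) × Int) (rp : Int × Int) : (Int × Int) × Int :=
  if pvKey rp < st.2 then (rp, pvKey rp) else st

-- Relation between A's fold state and the head of the stable sort, by reverse induction.
theorem pvInvariant (l : List (Int × Int)) :
    (match PySem.List.sorted l pvKey false with
     | [] => l.foldl pvStep ((0, 0), 10000) = ((0, 0), 10000)
     | b :: _ =>
        if pvKey b < 10000 then l.foldl pvStep ((0, 0), 10000) = (b, pvKey b)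
        else l.foldl pvStep ((0, 0), 10000) = ((0, 0), 10000)) := by
  induction l using List.reverseRecOn with
  | nil => simp [PySem.List.sorted]
  | append_singleton l x ih =>
    have hs : PySem.List.sorted (l ++ [x]) pvKey false =
        PySem.List.insertBy (fun a b => decide (pvKey a < pvKey b)) x (PySem.List.sorted l pvKey false) := by
      rw [PySem.List.sorted_eq_foldl_insertBy, PySem.List.sorted_eq_foldl_insertBy]
      simp [List.foldl_append]
    rw [List.foldl_append]
    cases h : PySem.List.sorted l pvKey false with
    | nil =>
      rw [h] at ih
      replace ih : List.foldl pvStep ((0, 0), 10000) l = ((0, 0), 10000) := ih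
      rw [hs, h]
      simp only [PySem.List.insertBy]
      simp only [List.foldl_cons, List.foldl_nil, ih]
      by_cases hx : pvKey x < 10000 <;> simp [pvStep, hx]
    | cons b t =>
      rw [h] at ih
      replace ih :
          (if pvKey b < 10000 then List.foldl pvStep ((0, 0), 10000) l = (b, pvKey b)
           else List.foldl pvStep ((0, 0), 10000) l = ((0, 0), 10000)) := ih
      rw [hs, h]
      simp only [PySem.List.insertBy]
      by_cases hxb : pvKey x < pvKey b
      · simp only [hxb, decide_true, if_true]
        by_cases hb : pvKey b < 10000
        · rw [if_pos hb] at ih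
          have hx : pvKey x < 10000 := lt_trans hxb hb
          simp [List.foldl_cons, ih, pvStep, hx, hxb]
        · rw [if_neg hb] at ih
          by_cases hx : pvKey x < 10000 <;> simp [List.foldl_cons, ih, pvStep, hx]
      · simp only [hxb, decide_false, Bool.false_eq_true, if_false]
        by_cases hb : pvKey b < 10000
        · rw [if_pos hb] at ih
          rw [if_pos hb]
          simp [List.foldl_cons, ih, pvStep, hxb]
        · rw [if_neg hb] at ih
          rw [if_neg hb]
          have hx : ¬ pvKey x < 10000 := fun hc => hb (lt_of_le_of_lt (not_lt.mp hxb) hc)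
          simp [List.foldl_cons, ih, pvStep, hx]

-- A's helper builds exactly the map of deltas.
theorem pvDeltas (position : Int × Int) (targets : List (Int × Int)) :
    get_relative_positions position targets
      = targets.map (fun t => (t.1 - position.1, t.2 - position.2)) := by
  unfold get_relative_positions
  by_cases h : targets = []
  · simp [h]
  · rw [if_neg h,
      PySem.List.foldl_append_singleton_eq_map (fun t : Int × Int => (t.1 - position.1, t.2 - position.2)) targets []]
    simp

-- ===== VERDICT (by name: the statement is the Claim_ definition above) =====
theorem get_relative_position_to_nearest_spec : Claim_equal_get_relative_position_to_nearest := by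
  intro position targets max_distance _
  unfold Spec_get_relative_position_to_nearest
  unfold get_relative_position_to_nearest get_relative_position_to_nearest_alt
  rw [pvDeltas]
  have hkey : (fun d : Int × Int => d.1 * d.1 + d.2 * d.2) = pvKey := by
    funext d; simp [pvKey]
  have hstep : (fun (st : (Int × Int) × Int) (rp : Int × Int) =>
      let d2 := rp.1 ^ 2 + rp.2 ^ 2
      if d2 < st.2 then (rp, d2) else st) = pvStep := by
    funext st rp
    simp [pvStep, pvKey, pow_two]
  simp only [hkey, hstep]
  set deltas := targets.map (fun t => (t.1 - position.1, t.2 - position.2)) with hd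
  have hinv := pvInvariant deltas
  cases hsort : PySem.List.sorted deltas pvKey false with
  | nil =>
    have hnil : deltas = [] := (PySem.List.sorted_eq_nil_iff deltas pvKey false).mp hsort
    rw [if_pos hnil]
  | cons b t =>
    rw [hsort] at hinv
    replace hinv :
        (if pvKey b < 10000 then List.foldl pvStep ((0, 0), 10000) deltas = (b, pvKey b)
         else List.foldl pvStep ((0, 0), 10000) deltas = ((0, 0), 10000)) := hinv
    have hne : deltas ≠ [] := by
      intro hc
      rw [hc] at hsort
      simp [PySem.List.sorted] at hsort
    rw [if_neg hne]
    by_cases hb : pvKey b < 10000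
    · rw [if_pos hb] at hinv
      rw [hinv]
      have hb' : b.1 * b.1 + b.2 * b.2 < 10000 := hb
      simp [hb']
    · rw [if_neg hb] at hinv
      rw [hinv]
      have hb' : ¬ b.1 * b.1 + b.2 * b.2 < 10000 := hb
      simp [hb']
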